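-- pv_equiv track=rewrite | github.com/youtubediscord/zapret | src/direct_preset/engines/_shared.py | split_preamble_and_profile_lines
-- ===== SOURCE A (Python) =====
-- _MATCH_PREFIXES = (
--     "--filter-",
--     "--hostlist=",
--     "--hostlist-domains=",
--     "--hostlist-exclude=",
--     "--ipset=",
--     "--ipset-exclude=",
--     "--ipset-ip=",
--     "--payload=",
--     "--in-range",
-- )
--
-- _ACTION_PREFIXES = (
--     "--out-range",
--     "--lua-desync=",
--     "--dpi-desync",
--     "--dup",
--     "--wssize",
-- )
--
-- _DIRECTIVE_PREFIXES = (
--     "--name",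
--     "--template",
--     "--import",
--     "--skip",
--     "--cookie",
-- )
--
-- def split_preamble_and_profile_lines(body_lines: list[str]) -> tuple[list[str], list[list[str]]]:
--     preamble: list[str] = []
--     profiles: list[list[str]] = []
--     current: list[str] = []
--     saw_profile = False
--
--     def _push_profile(raw_lines: list[str]) -> None:
--         trimmed = _trim_blank_profile_edges(raw_lines)
--         if trimmed:
--             profiles.append(trimmed)
--
--     for raw in body_lines:
--         stripped = raw.strip()
--         if stripped == "--new":
--             if saw_profile:
--                 _push_profile(current)
--                 current = []
--             elif current:
--                 preamble.extend(current)
--                 current = []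
--             saw_profile = True
--             continue
--         if not saw_profile and not _looks_like_profile_line(stripped):
--             preamble.append(raw)
--             continue
--         if not saw_profile and _looks_like_profile_line(stripped):
--             saw_profile = True
--         current.append(raw)
--     if current:
--         if saw_profile:
--             _push_profile(current)
--         else:
--             preamble.extend(current)
--     return preamble, profiles
--
-- def _trim_blank_profile_edges(lines: list[str]) -> list[str]:
--     start = 0
--     end = len(lines)
--
--     while start < end and not str(lines[start]).strip():
--         start += 1
--     while end > start and not str(lines[end - 1]).strip():
--         end -= 1
--
--     return list(lines[start:end])
--
-- def _looks_like_profile_line(stripped: str) -> bool: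
--     return any(stripped.startswith(prefix) for prefix in _MATCH_PREFIXES + _ACTION_PREFIXES + _DIRECTIVE_PREFIXES)
-- ===== SOURCE B (Python) =====
-- _MATCH_PREFIXES = (
--     "--filter-",
--     "--hostlist=",
--     "--hostlist-domains=",
--     "--hostlist-exclude=",
--     "--ipset=",
--     "--ipset-exclude=",
--     "--ipset-ip=",
--     "--payload=",
--     "--in-range",
-- )
--
-- _ACTION_PREFIXES = (
--     "--out-range",
--     "--lua-desync=",
--     "--dpi-desync",
--     "--dup",
--     "--wssize",
-- )
--
-- _DIRECTIVE_PREFIXES = (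
--     "--name",
--     "--template",
--     "--import",
--     "--skip",
--     "--cookie",
-- )
--
--
-- def _looks_like_profile_line(stripped: str) -> bool:
--     return any(stripped.startswith(prefix) for prefix in _MATCH_PREFIXES + _ACTION_PREFIXES + _DIRECTIVE_PREFIXES)
--
--
-- def _trim_blank_profile_edges(lines: list[str]) -> list[str]:
--     start = 0
--     end = len(lines)
--     while start < end and not str(lines[start]).strip():
--         start += 1
--     while end > start and not str(lines[end - 1]).strip():
--         end -= 1
--     return list(lines[start:end])
--
--
-- def split_preamble_and_profile_lines(body_lines: list[str]) -> tuple[list[str], list[list[str]]]: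
--     # Split into segments at '--new' separator lines.
--     segments: list[list[str]] = [[]]
--     for raw in body_lines:
--         if raw.strip() == "--new":
--             segments.append([])
--         else:
--             segments[-1].append(raw)
--     # Segment 0: preamble up to the first profile-looking line.
--     first = segments[0]
--     i = next((k for k, line in enumerate(first) if _looks_like_profile_line(line.strip())), len(first))
--     preamble = first[:i]
--     candidates = segments[1:] if i == len(first) else [first[i:]] + segments[1:]
--     profiles: list[list[str]] = []
--     for cand in candidates:
--         trimmed = _trim_blank_profile_edges(cand)
--         if trimmed:
--             profiles.append(trimmed)
--     return preamble, profiles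
-- ===== Notes on version B (the rewrite author's own statement) =====
-- stated objective: alternative
-- what changed: B replaces A's single-pass state machine (saw_profile flag plus a mutable current buffer pushed at '--new' boundaries) by a two-phase decomposition: first split the lines into '--new'-delimited segments, then split segment 0 at its first profile-looking line into preamble and first candidate, and finally trim/filter all candidates into profiles.
import Mathlib
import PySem

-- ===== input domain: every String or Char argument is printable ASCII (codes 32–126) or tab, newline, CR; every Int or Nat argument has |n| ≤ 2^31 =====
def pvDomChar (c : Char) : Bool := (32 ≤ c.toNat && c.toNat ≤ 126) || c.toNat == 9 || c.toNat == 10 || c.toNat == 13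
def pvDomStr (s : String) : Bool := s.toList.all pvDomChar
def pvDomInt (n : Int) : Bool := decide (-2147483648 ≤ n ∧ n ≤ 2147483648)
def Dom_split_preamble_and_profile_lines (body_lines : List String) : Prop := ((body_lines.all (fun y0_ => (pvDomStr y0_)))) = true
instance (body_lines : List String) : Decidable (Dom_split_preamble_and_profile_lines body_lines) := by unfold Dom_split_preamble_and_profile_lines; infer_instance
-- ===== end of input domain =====

-- B replaces A's one-pass state machine by a segment-split decomposition ('--new' segments,
-- then segment 0 split at its first profile-looking line); same cost, alternative structure.

-- ===== PORT A =====
-- _MATCH_PREFIXES + _ACTION_PREFIXES + _DIRECTIVE_PREFIXES, in tuple-concatenation order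
def pvPrefixes : List String :=
  ["--filter-", "--hostlist=", "--hostlist-domains=", "--hostlist-exclude=",
   "--ipset=", "--ipset-exclude=", "--ipset-ip=", "--payload=", "--in-range",
   "--out-range", "--lua-desync=", "--dpi-desync", "--dup", "--wssize",
   "--name", "--template", "--import", "--skip", "--cookie"]

-- _looks_like_profile_line (shared helper, identical in Source A and Source B)
def looksLikeProfileLine (stripped : String) : Bool :=
  pvPrefixes.any (fun p => PySem.Str.startswith stripped p)

-- while start < end and not str(lines[start]).strip(): start += 1
-- (fuel k = end - start encodes the loop guard start < end; lines.getD is exact, index in range)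
def trimStartIdxAux (lines : List String) : Nat → Nat → Nat
  | 0, s => s
  | k + 1, s => if PySem.Str.strip (lines.getD s "") = "" then trimStartIdxAux lines k (s + 1) else s

-- while end > start and not str(lines[end - 1]).strip(): end -= 1  (fuel k = end - start)
def trimEndIdxAux (lines : List String) : Nat → Nat → Nat
  | 0, e => e
  | k + 1, e => if PySem.Str.strip (lines.getD (e - 1) "") = "" then trimEndIdxAux lines k (e - 1) else e

-- _trim_blank_profile_edges (shared helper, identical in Source A and Source B);
-- list(lines[start:end]) with 0 ≤ start ≤ len is exactly (drop start).take (end - start)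
def trimBlankProfileEdges (lines : List String) : List String :=
  let start := trimStartIdxAux lines lines.length 0
  let e := trimEndIdxAux lines (lines.length - start) lines.length
  (lines.drop start).take (e - start)

-- _push_profile / the identical two-line push in B's loop
def pushProfile (profiles : List (List String)) (raw_lines : List String) : List (List String) :=
  let trimmed := trimBlankProfileEdges raw_lines
  if trimmed ≠ [] then profiles ++ [trimmed] else profiles

-- A's for-loop as structural recursion over the same state (preamble, profiles, current, saw_profile)
def loopA : List String → List String → List (List String) → List String → Bool → List String × List (List String)
  | [], preamble, profiles, current, saw =>
      if current ≠ [] then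
        if saw then (preamble, pushProfile profiles current)
        else (preamble ++ current, profiles)
      else (preamble, profiles)
  | raw :: rest, preamble, profiles, current, saw =>
      let stripped := PySem.Str.strip raw
      if stripped = "--new" then
        if saw then loopA rest preamble (pushProfile profiles current) [] true
        else if current ≠ [] then loopA rest (preamble ++ current) profiles [] true
        else loopA rest preamble profiles [] true
      else if !saw && !looksLikeProfileLine stripped then
        loopA rest (preamble ++ [raw]) profiles current saw
      else if !saw && looksLikeProfileLine stripped then
        loopA rest preamble profiles (current ++ [raw]) true
      else
        loopA rest preamble profiles (current ++ [raw]) saw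

def split_preamble_and_profile_lines (body_lines : List String) : List String × List (List String) :=
  loopA body_lines [] [] [] false

-- ===== PORT B =====
-- B's segment builder: state = (finished segments, segments[-1])
def segStep (st : List (List String) × List String) (raw : String) : List (List String) × List String :=
  if PySem.Str.strip raw = "--new" then (st.1 ++ [st.2], []) else (st.1, st.2 ++ [raw])

def split_preamble_and_profile_lines_alt (body_lines : List String) : List String × List (List String) :=
  let st := body_lines.foldl segStep ([], [])
  let segments := st.1 ++ [st.2]
  match segments with
  | [] => ([], [])   -- unreachable: segments ends with [st.2]
  | first :: restSegs =>
    -- next((k for k, line in enumerate(first) if ...), len(first)) = findIdx (length if absent)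
    let i := first.findIdx (fun line => looksLikeProfileLine (PySem.Str.strip line))
    let preamble := first.take i
    let candidates := if i = first.length then restSegs else first.drop i :: restSegs
    let profiles := candidates.foldl pushProfile []
    (preamble, profiles)

-- ===== PRECONDITION & SPEC =====
def Spec_split_preamble_and_profile_lines (body_lines : List String) (out : List String × List (List String)) : Prop := out = split_preamble_and_profile_lines_alt body_lines
instance (body_lines : List String) (out : List String × List (List String)) : Decidable (Spec_split_preamble_and_profile_lines body_lines out) := by unfold Spec_split_preamble_and_profile_lines; infer_instance

-- ===== CLAIM (what is proved, stated in full; the proofs are below) =====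
def Claim_equal_split_preamble_and_profile_lines : Prop := ∀ (body_lines : List String), Dom_split_preamble_and_profile_lines body_lines → Spec_split_preamble_and_profile_lines body_lines (split_preamble_and_profile_lines body_lines)

-- ===== LEMMAS AND PROOFS =====

-- (first segment, later segments) of the '--new' split, built by head recursion (proof-side view)
def segsP : List String → List String × List (List String)
  | [] => ([], [])
  | h :: t =>
    if PySem.Str.strip h = "--new" then ([], (segsP t).1 :: (segsP t).2)
    else (h :: (segsP t).1, (segsP t).2)

def filtTrim (segs : List (List String)) : List (List String) :=
  segs.filterMap (fun c => if trimBlankProfileEdges c = [] then none else some (trimBlankProfileEdges c))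

theorem pushProfile_eq (profs : List (List String)) (c : List String) :
    pushProfile profs c = profs ++ filtTrim [c] := by
  simp only [pushProfile, filtTrim, List.filterMap]
  by_cases h : trimBlankProfileEdges c = [] <;> simp [h]

theorem foldl_pushProfile (segs : List (List String)) (profs : List (List String)) :
    segs.foldl pushProfile profs = profs ++ filtTrim segs := by
  induction segs generalizing profs with
  | nil => simp [filtTrim]
  | cons c cs ih =>
    simp only [List.foldl_cons, ih, pushProfile_eq]
    simp [filtTrim, List.filterMap_cons]
    by_cases h : trimBlankProfileEdges c = [] <;> simp [h]

theorem segs_fold (lines : List String) : ∀ (done : List (List String)) (cur : List String),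
    (lines.foldl segStep (done, cur)).1 ++ [(lines.foldl segStep (done, cur)).2]
      = done ++ (cur ++ (segsP lines).1) :: (segsP lines).2 := by
  induction lines with
  | nil => intro done cur; simp [segsP]
  | cons h t ih =>
    intro done cur
    by_cases hn : PySem.Str.strip h = "--new"
    · simp [segStep, segsP, hn, ih]
    · simp [segStep, segsP, hn, ih]

theorem trim_nil : trimBlankProfileEdges [] = [] := rfl

theorem loopA_true (lines : List String) :
    ∀ (pre : List String) (profs : List (List String)) (cur : List String),
    loopA lines pre profs cur true
      = (pre, profs ++ filtTrim ((cur ++ (segsP lines).1) :: (segsP lines).2)) := by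
  induction lines with
  | nil =>
    intro pre profs cur
    simp only [loopA, segsP, List.append_nil]
    by_cases h : cur = []
    · subst h; simp [filtTrim, trim_nil]
    · simp [h, pushProfile_eq, filtTrim]
  | cons h t ih =>
    intro pre profs cur
    by_cases hn : PySem.Str.strip h = "--new"
    · simp only [loopA, hn, if_true, ih, segsP, pushProfile_eq]
      simp [filtTrim, List.filterMap_cons]
      by_cases hc : trimBlankProfileEdges cur = [] <;> simp [hc]
    · simp only [loopA, hn, if_false, Bool.not_true, Bool.false_and, Bool.false_eq_true,
        ih, segsP]
      simp


def altSpec (lines : List String) : List String × List (List String) :=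
  let f := (segsP lines).1
  let i := f.findIdx (fun line => looksLikeProfileLine (PySem.Str.strip line))
  (f.take i,
   if i = f.length then filtTrim (segsP lines).2
   else filtTrim (f.drop i :: (segsP lines).2))

theorem alt_char (lines : List String) :
    split_preamble_and_profile_lines_alt lines = altSpec lines := by
  have h := segs_fold lines [] []
  simp only [List.nil_append] at h
  simp only [split_preamble_and_profile_lines_alt, altSpec]
  rw [h]
  simp only [foldl_pushProfile, List.nil_append]
  rw [apply_ite filtTrim]

theorem loopA_false (lines : List String) :
    ∀ (pre : List String) (profs : List (List String)),
    loopA lines pre profs [] false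
      = (pre ++ (altSpec lines).1, profs ++ (altSpec lines).2) := by
  induction lines with
  | nil =>
    intro pre profs
    simp [loopA, altSpec, segsP, filtTrim]
  | cons h t ih =>
    intro pre profs
    by_cases hn : PySem.Str.strip h = "--new"
    · have step : loopA (h :: t) pre profs [] false = loopA t pre profs [] true := by
        simp [loopA, hn]
      rw [step, loopA_true t]
      simp [altSpec, segsP, hn]
    · by_cases hl : looksLikeProfileLine (PySem.Str.strip h) = true
      · have step : loopA (h :: t) pre profs [] false = loopA t pre profs [h] true := by
          simp [loopA, hn, hl]
        rw [step, loopA_true t]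
        simp [altSpec, segsP, hn, List.findIdx_cons, hl]
      · have step : loopA (h :: t) pre profs [] false = loopA t (pre ++ [h]) profs [] false := by
          simp [loopA, hn, hl]
        rw [step, ih]
        have hf : (segsP (h :: t)).1 = h :: (segsP t).1 := by simp [segsP, hn]
        have hs : (segsP (h :: t)).2 = (segsP t).2 := by simp [segsP, hn]
        simp [altSpec, hf, hs, List.findIdx_cons, hl]

-- ===== VERDICT (by name: the statement is the Claim_ definition above) =====
theorem split_preamble_and_profile_lines_spec : Claim_equal_split_preamble_and_profile_lines := by
  intro body_lines _
  unfold Spec_split_preamble_and_profile_lines split_preamble_and_profile_lines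
  rw [loopA_false, alt_char]
  simp
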